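-- pv_equiv track=rewrite | github.com/richkingsford/cub-queso | helper_demo_log_utils.py | prune_unmatched_blocks
-- ===== SOURCE A (Python) =====
-- ATTEMPT_START_MARKERS = {
--     "SUCCESS_START": "SUCCESS",
--     "FAIL_START": "FAIL",
--     "RECOVER_START": "RECOVER",
-- }
--
-- ATTEMPT_END_MARKERS = {
--     "SUCCESS_END": "SUCCESS",
--     "FAIL_END": "FAIL",
--     "RECOVER_END": "RECOVER",
-- }
--
-- ALWAYS_KEEP_KEYFRAMES = {
--     "JOB_START",
--     "JOB_END",
--     "JOB_ABORT",
--     "JOB_SUCCESS",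
-- }
--
-- def prune_unmatched_blocks(entries):
--     active = {}
--     keep_indices = set()
--     valid_indices = set()
--     valid_blocks = 0
--
--     for idx, entry in enumerate(entries):
--         entry_type = entry.get("type")
--         marker = entry.get("marker") if entry_type == "keyframe" else None
--         is_start = marker in ATTEMPT_START_MARKERS
--         is_end = marker in ATTEMPT_END_MARKERS
--         always_keep = marker in ALWAYS_KEEP_KEYFRAMES
--         unmatched_end = False
--
--         if is_start:
--             seg_type = ATTEMPT_START_MARKERS[marker]
--             active[seg_type] = []
--
--         if is_end:
--             seg_type = ATTEMPT_END_MARKERS[marker]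
--             seg_indices = active.pop(seg_type, None)
--             if seg_indices is not None:
--                 seg_indices.append(idx)
--                 valid_indices.update(seg_indices)
--                 valid_blocks += 1
--             else:
--                 unmatched_end = True
--
--         for seg_indices in active.values():
--             seg_indices.append(idx)
--
--         if always_keep:
--             keep_indices.add(idx)
--         elif not active and not is_start and not unmatched_end:
--             keep_indices.add(idx)
--
--     keep_indices.update(valid_indices)
--     pruned = [entry for idx, entry in enumerate(entries) if idx in keep_indices]
--     return pruned, valid_blocks
-- ===== SOURCE B (Python) =====
-- ATTEMPT_START_MARKERS = {
--     "SUCCESS_START": "SUCCESS",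
--     "FAIL_START": "FAIL",
--     "RECOVER_START": "RECOVER",
-- }
--
-- ATTEMPT_END_MARKERS = {
--     "SUCCESS_END": "SUCCESS",
--     "FAIL_END": "FAIL",
--     "RECOVER_END": "RECOVER",
-- }
--
-- ALWAYS_KEEP_KEYFRAMES = {
--     "JOB_START",
--     "JOB_END",
--     "JOB_ABORT",
--     "JOB_SUCCESS",
-- }
--
--
-- def prune_unmatched_blocks(entries):
--     # B: staged passes over a boolean keep-array instead of A's index sets.
--     # Pass 1 precomputes each entry's marker; pass 2 matches blocks keeping
--     # only a start index per active type and records matched (start, end)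
--     # intervals, setting keep flags directly in a bool array; pass 3 patches
--     # the flags of every matched interval; pass 4 zips and filters.
--     markers = [entry.get("marker") if entry.get("type") == "keyframe" else None
--                for entry in entries]
--     keep = [False] * len(entries)
--     blocks = []
--     active = {}
--     for idx, marker in enumerate(markers):
--         is_start = marker in ATTEMPT_START_MARKERS
--         unmatched_end = False
--         if is_start:
--             active[ATTEMPT_START_MARKERS[marker]] = idx
--         if marker in ATTEMPT_END_MARKERS:
--             start = active.pop(ATTEMPT_END_MARKERS[marker], None)
--             if start is None:
--                 unmatched_end = True
--             else:
--                 blocks.append((start, idx))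
--         if marker in ALWAYS_KEEP_KEYFRAMES or (
--                 not active and not is_start and not unmatched_end):
--             keep[idx] = True
--     for start, end in blocks:
--         for i in range(start, end + 1):
--             keep[i] = True
--     pruned = [entry for entry, kept in zip(entries, keep) if kept]
--     return pruned, len(blocks)
-- ===== Notes on version B (the rewrite author's own statement) =====
-- stated objective: alternative
-- what changed: A accumulates a growing index list per active block (an inner loop appends the current index to every active list on every iteration) and collects keep/valid index SETS filtered against enumerate at the end; B instead precomputes the markers, keeps only a start index per active type, records matched (start, end) intervals, sets flags in a preallocated boolean keep-array (patching each interval once after the loop) and zip-filters the entries against it; it trades A's set machinery for staged passes over an array of flags.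
import Mathlib
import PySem

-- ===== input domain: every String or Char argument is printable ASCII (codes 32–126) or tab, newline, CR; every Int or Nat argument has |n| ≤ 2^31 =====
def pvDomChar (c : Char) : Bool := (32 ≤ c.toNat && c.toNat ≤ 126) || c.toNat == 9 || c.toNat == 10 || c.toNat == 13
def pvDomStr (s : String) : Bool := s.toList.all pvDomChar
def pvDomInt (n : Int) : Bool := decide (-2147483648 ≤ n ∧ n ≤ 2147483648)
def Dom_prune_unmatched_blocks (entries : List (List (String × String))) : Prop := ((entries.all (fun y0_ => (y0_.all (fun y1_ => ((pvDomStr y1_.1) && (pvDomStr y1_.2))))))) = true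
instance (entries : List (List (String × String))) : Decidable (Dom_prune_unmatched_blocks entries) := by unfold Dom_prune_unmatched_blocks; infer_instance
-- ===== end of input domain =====

-- B replaces A's one-pass accumulation of per-active-block index LISTS and index SETS by
-- staged passes over a boolean keep-array: precompute markers, match blocks keeping only a
-- start index and recording (start, end) intervals, patch the intervals into the bool array,
-- then zip-filter; objective: alternative (the per-iteration append loop and the sets disappear).

-- shared module-level constants of the Python file
def pvStartMarkers : PySem.Dict String String :=
  PySem.Dict.mk [("SUCCESS_START", "SUCCESS"), ("FAIL_START", "FAIL"), ("RECOVER_START", "RECOVER")]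
def pvEndMarkers : PySem.Dict String String :=
  PySem.Dict.mk [("SUCCESS_END", "SUCCESS"), ("FAIL_END", "FAIL"), ("RECOVER_END", "RECOVER")]
def pvKeepKeyframes : PySem.Set String :=
  PySem.Set.ofList ["JOB_START", "JOB_END", "JOB_ABORT", "JOB_SUCCESS"]

-- ===== PORT A =====
-- loop state of A: (active : seg_type ↦ accumulated index list, keep_indices, valid_indices, valid_blocks)
def pvStateA : Type := PySem.Dict String (List Int) × List Int × List Int × Int

-- second half of A's loop body: the `if is_end:` block, the
-- `for seg_indices in active.values(): seg_indices.append(idx)` loop and the keep logic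
def pvEndPartA (idx : Int) (endSeg : Option String) (is_start always_keep : Bool)
    (active1 : PySem.Dict String (List Int)) (keep valid : List Int) (blocks : Int) : pvStateA :=
  let endRes : PySem.Dict String (List Int) × List Int × Int × Bool :=
    match endSeg with
    | some seg =>
      match PySem.Dict.pop? active1 seg with
      | some (seg_indices, act') =>
        let seg_indices := seg_indices ++ [idx]
        (act', seg_indices.foldl PySem.Set.add valid, blocks + 1, false)
      | none => (active1, valid, blocks, true)
    | none => (active1, valid, blocks, false)
  let active2 := endRes.1
  let valid2 := endRes.2.1
  let blocks2 := endRes.2.2.1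
  let unmatched_end := endRes.2.2.2
  let active3 := PySem.Dict.mk (active2.items.map (fun p => (p.1, p.2 ++ [idx])))
  let keep3 :=
    if always_keep then PySem.Set.add keep idx
    else if active3.items.isEmpty && !is_start && !unmatched_end then PySem.Set.add keep idx
    else keep
  (active3, keep3, valid2, blocks2)

-- one iteration of A's `for idx, entry in enumerate(entries)` body
def pvStepA (idx : Int) (entry : List (String × String)) (st : pvStateA) : pvStateA :=
  let entry_type := PySem.Dict.get? (PySem.Dict.mk entry) "type"
  let marker : Option String :=
    if entry_type = some "keyframe" then PySem.Dict.get? (PySem.Dict.mk entry) "marker" else none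
  let startSeg : Option String := marker.bind (fun m => PySem.Dict.get? pvStartMarkers m)
  let endSeg : Option String := marker.bind (fun m => PySem.Dict.get? pvEndMarkers m)
  let is_start : Bool := startSeg.isSome
  let always_keep : Bool := match marker with
    | some m => PySem.Set.contains pvKeepKeyframes m
    | none => false
  -- if is_start: active[seg_type] = []
  let active1 := match startSeg with
    | some seg => st.1.insert seg ([] : List Int)
    | none => st.1
  pvEndPartA idx endSeg is_start always_keep active1 st.2.1 st.2.2.1 st.2.2.2

def pvLoopA (idx : Int) (entries : List (List (String × String))) (st : pvStateA) : pvStateA :=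
  match entries with
  | [] => st
  | e :: es => pvLoopA (idx + 1) es (pvStepA idx e st)

-- [entry for idx, entry in enumerate(entries) if idx in keep_indices]
def pvFilterA (idx : Int) (entries : List (List (String × String))) (keep : List Int) :
    List (List (String × String)) :=
  match entries with
  | [] => []
  | e :: es =>
    if keep.contains idx then e :: pvFilterA (idx + 1) es keep else pvFilterA (idx + 1) es keep

def prune_unmatched_blocks (entries : List (List (String × String))) :
    (List (List (String × String))) × Int :=
  let st := pvLoopA 0 entries (PySem.Dict.mk [], [], [], 0)
  let keep := st.2.2.1.foldl PySem.Set.add st.2.1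
  (pvFilterA 0 entries keep, st.2.2.2)

-- ===== PORT B =====
-- pass 1 of B: `entry.get("marker") if entry.get("type") == "keyframe" else None`
def pvMarkerOf (entry : List (String × String)) : Option String :=
  if PySem.Dict.get? (PySem.Dict.mk entry) "type" = some "keyframe"
  then PySem.Dict.get? (PySem.Dict.mk entry) "marker" else none

-- loop state of B: (keep : bool array, blocks : matched (start, end) intervals, active : seg_type ↦ start index)
def pvStateB : Type := List Bool × List (Int × Int) × PySem.Dict String Int

-- one iteration of B's `for idx, marker in enumerate(markers)` body
def pvStepB (idx : Nat) (marker : Option String) (st : pvStateB) : pvStateB :=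
  let startSeg : Option String := marker.bind (fun m => PySem.Dict.get? pvStartMarkers m)
  let is_start : Bool := startSeg.isSome
  let active1 := match startSeg with
    | some seg => st.2.2.insert seg (idx : Int)
    | none => st.2.2
  let endSeg : Option String := marker.bind (fun m => PySem.Dict.get? pvEndMarkers m)
  let endRes : List (Int × Int) × PySem.Dict String Int × Bool :=
    match endSeg with
    | some seg =>
      match PySem.Dict.pop? active1 seg with
      | some (start, act') => (st.2.1 ++ [(start, (idx : Int))], act', false)
      | none => (st.2.1, active1, true)
    | none => (st.2.1, active1, false)
  let always_keep : Bool := match marker with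
    | some m => PySem.Set.contains pvKeepKeyframes m
    | none => false
  let keep1 :=
    if always_keep || (endRes.2.1.items.isEmpty && !is_start && !endRes.2.2)
    then st.1.set idx true else st.1
  (keep1, endRes.1, endRes.2.1)

def pvLoopB (idx : Nat) (markers : List (Option String)) (st : pvStateB) : pvStateB :=
  match markers with
  | [] => st
  | m :: ms => pvLoopB (idx + 1) ms (pvStepB idx m st)

-- pass 3 of B: `for i in range(start, end + 1): keep[i] = True`
-- (every i here is a valid nonnegative index of keep, so `.set i.toNat` is exact)
def pvPatchBlock (keep : List Bool) (b : Int × Int) : List Bool :=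
  (PySem.List.pyRange b.1 (b.2 + 1) 1).foldl (fun k i => k.set i.toNat true) keep

def prune_unmatched_blocks_alt (entries : List (List (String × String))) :
    (List (List (String × String))) × Int :=
  let markers := entries.map pvMarkerOf
  let st := pvLoopB 0 markers (List.replicate entries.length false, [], PySem.Dict.mk [])
  let keepF := st.2.1.foldl pvPatchBlock st.1
  ((entries.zip keepF).filterMap (fun p => if p.2 then some p.1 else none),
   (st.2.1.length : Int))

-- ===== PRECONDITION & SPEC =====
def Spec_prune_unmatched_blocks (entries : List (List (String × String))) (out : (List (List (String × String))) × Int) : Prop := out = prune_unmatched_blocks_alt entries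
instance (entries : List (List (String × String))) (out : (List (List (String × String))) × Int) : Decidable (Spec_prune_unmatched_blocks entries out) := by unfold Spec_prune_unmatched_blocks; infer_instance

-- ===== CLAIM (what is proved, stated in full; the proofs are below) =====
def Claim_equal_prune_unmatched_blocks : Prop := ∀ (entries : List (List (String × String))), Dom_prune_unmatched_blocks entries → Spec_prune_unmatched_blocks entries (prune_unmatched_blocks entries)

-- ===== LEMMAS AND PROOFS =====

-- M: an intermediate "A with only start indices" machine used solely by the proofs; it
-- bridges A's per-block index lists to B's interval list and bool array in two stages.
def pvStateM : Type := PySem.Dict String Int × List Int × List Int × Int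

def pvEndPartM (idx : Int) (endSeg : Option String) (is_start always_keep : Bool)
    (active1 : PySem.Dict String Int) (keep valid : List Int) (blocks : Int) : pvStateM :=
  let endRes : PySem.Dict String Int × List Int × Int × Bool :=
    match endSeg with
    | some seg =>
      match PySem.Dict.pop? active1 seg with
      | some (start, act') =>
        (act', (PySem.List.pyRange start (idx + 1) 1).foldl PySem.Set.add valid, blocks + 1, false)
      | none => (active1, valid, blocks, true)
    | none => (active1, valid, blocks, false)
  let active2 := endRes.1
  let valid2 := endRes.2.1
  let blocks2 := endRes.2.2.1
  let unmatched_end := endRes.2.2.2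
  let keep2 :=
    if always_keep then PySem.Set.add keep idx
    else if active2.items.isEmpty && !is_start && !unmatched_end then PySem.Set.add keep idx
    else keep
  (active2, keep2, valid2, blocks2)

def pvStepM (idx : Int) (entry : List (String × String)) (st : pvStateM) : pvStateM :=
  let entry_type := PySem.Dict.get? (PySem.Dict.mk entry) "type"
  let marker : Option String :=
    if entry_type = some "keyframe" then PySem.Dict.get? (PySem.Dict.mk entry) "marker" else none
  let startSeg : Option String := marker.bind (fun m => PySem.Dict.get? pvStartMarkers m)
  let endSeg : Option String := marker.bind (fun m => PySem.Dict.get? pvEndMarkers m)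
  let is_start : Bool := startSeg.isSome
  let always_keep : Bool := match marker with
    | some m => PySem.Set.contains pvKeepKeyframes m
    | none => false
  let active1 := match startSeg with
    | some seg => st.1.insert seg idx
    | none => st.1
  pvEndPartM idx endSeg is_start always_keep active1 st.2.1 st.2.2.1 st.2.2.2

def pvLoopM (idx : Int) (entries : List (List (String × String))) (st : pvStateM) : pvStateM :=
  match entries with
  | [] => st
  | e :: es => pvLoopM (idx + 1) es (pvStepM idx e st)

-- ---- stage 1: A simulates M ----

-- map a function over the values of a dict, keeping keys and order
def pvMapVal (f : Int → List Int) (d : PySem.Dict String Int) : PySem.Dict String (List Int) :=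
  PySem.Dict.mk (d.items.map (fun p => (p.1, f p.2)))

theorem pvMapVal_contains (f : Int → List Int) (d : PySem.Dict String Int) (k : String) :
    (pvMapVal f d).contains k = d.contains k := by
  simp [pvMapVal, PySem.Dict.contains, List.any_map, Function.comp_def]

theorem pvMapVal_insert (f : Int → List Int) (d : PySem.Dict String Int) (k : String) (v : Int) :
    (pvMapVal f d).insert k (f v) = pvMapVal f (d.insert k v) := by
  simp only [PySem.Dict.insert, pvMapVal_contains]
  cases h : d.contains k with
  | true =>
    simp only [pvMapVal, if_true, List.map_map]
    congr 1
    apply List.map_congr_left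
    intro p _
    by_cases hk : p.1 = k <;> simp [hk]
  | false => simp [pvMapVal]

theorem pvMapVal_get? (f : Int → List Int) (d : PySem.Dict String Int) (k : String) :
    (pvMapVal f d).get? k = (d.get? k).map f := by
  simp only [pvMapVal, PySem.Dict.get?, List.find?_map, Function.comp_def]
  cases h : List.find? (fun p => p.1 == k) d.items <;> simp

theorem pvMapVal_erase (f : Int → List Int) (d : PySem.Dict String Int) (k : String) :
    (pvMapVal f d).erase k = pvMapVal f (d.erase k) := by
  simp only [pvMapVal, PySem.Dict.erase, List.filter_map]
  rfl

theorem pvMapVal_pop? (f : Int → List Int) (d : PySem.Dict String Int) (k : String) :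
    (pvMapVal f d).pop? k = (d.pop? k).map (fun p => (f p.1, pvMapVal f p.2)) := by
  simp only [PySem.Dict.pop?, pvMapVal_get?, pvMapVal_erase]
  cases h : d.get? k <;> simp

theorem pvMapVal_append (f : Int → List Int) (g : Int → List Int) (d : PySem.Dict String Int)
    (n : Int) (h : ∀ p ∈ d.items, f p.2 ++ [n] = g p.2) :
    PySem.Dict.mk ((pvMapVal f d).items.map (fun p => (p.1, p.2 ++ [n]))) = pvMapVal g d := by
  simp only [pvMapVal, List.map_map]
  congr 1
  apply List.map_congr_left
  intro p hp
  simp [h p hp]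

-- the simulation invariant between A's and M's loop states after processing indices < n
def pvInv (n : Int) (a : pvStateA) (b : pvStateM) : Prop :=
  a.1 = pvMapVal (fun s => PySem.List.pyRange s n 1) b.1 ∧
  (∀ p ∈ b.1.items, p.2 ≤ n) ∧
  a.2.1 = b.2.1 ∧ a.2.2.1 = b.2.2.1 ∧ a.2.2.2 = b.2.2.2

theorem pvMem_insert_items {d : PySem.Dict String Int} {k : String} {v : Int} {p : String × Int}
    (hp : p ∈ (d.insert k v).items) : p = (k, v) ∨ p ∈ d.items := by
  rcases (PySem.Dict.mem_items_insert d k v p).1 hp with h | h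
  · exact Or.inl h
  · exact Or.inr h.1

theorem pvMem_erase_items {d : PySem.Dict String Int} {k : String} {p : String × Int}
    (hp : p ∈ (d.erase k).items) : p ∈ d.items := by
  simp only [PySem.Dict.erase, List.mem_filter] at hp
  exact hp.1

theorem pvEndPart_sim (n : Int) (endSeg : Option String) (is_start always_keep : Bool)
    (aAct : PySem.Dict String (List Int)) (bAct : PySem.Dict String Int)
    (keep valid : List Int) (blocks : Int)
    (hact : aAct = pvMapVal (fun s => PySem.List.pyRange s n 1) bAct)
    (hbnd : ∀ p ∈ bAct.items, p.2 ≤ n) :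
    pvInv (n + 1) (pvEndPartA n endSeg is_start always_keep aAct keep valid blocks)
      (pvEndPartM n endSeg is_start always_keep bAct keep valid blocks) := by
  have happ : ∀ (bd : PySem.Dict String Int), (∀ p ∈ bd.items, p.2 ≤ n) →
      PySem.Dict.mk ((pvMapVal (fun s => PySem.List.pyRange s n 1) bd).items.map
        (fun p => (p.1, p.2 ++ [n]))) = pvMapVal (fun s => PySem.List.pyRange s (n + 1) 1) bd := by
    intro bd hbd
    apply pvMapVal_append
    intro p hp
    exact (PySem.List.pyRange_one_succ_right (hbd p hp)).symm
  have hemp : ∀ (bd : PySem.Dict String Int),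
      ((pvMapVal (fun s => PySem.List.pyRange s n 1) bd).items.map
        (fun p => (p.1, p.2 ++ [n]))).isEmpty = bd.items.isEmpty := by
    intro bd
    simp [pvMapVal]
  cases endSeg with
  | none =>
    simp only [pvEndPartA, pvEndPartM, hact]
    unfold pvInv
    refine ⟨?_, ?_, ?_, rfl, rfl⟩
    · exact happ bAct hbnd
    · intro p hp
      exact le_trans (hbnd p hp) (by omega)
    · rw [hemp bAct]
  | some seg =>
    cases hpop : bAct.pop? seg with
    | none =>
      have hres : (pvMapVal (fun s => PySem.List.pyRange s n 1) bAct).pop? seg = none := by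
        rw [pvMapVal_pop?, hpop]
        rfl
      simp only [pvEndPartA, pvEndPartM, hact, hres, hpop]
      unfold pvInv
      refine ⟨?_, ?_, ?_, rfl, rfl⟩
      · exact happ bAct hbnd
      · intro p hp
        exact le_trans (hbnd p hp) (by omega)
      · rw [hemp bAct]
    | some pr =>
      obtain ⟨start, act'⟩ := pr
      have hres : (pvMapVal (fun s => PySem.List.pyRange s n 1) bAct).pop? seg =
          some (PySem.List.pyRange start n 1, pvMapVal (fun s => PySem.List.pyRange s n 1) act') := by
        rw [pvMapVal_pop?, hpop]
        rfl
      have hget : bAct.get? seg = some start ∧ act' = bAct.erase seg := by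
        simp only [PySem.Dict.pop?] at hpop
        cases hg : bAct.get? seg with
        | none => rw [hg] at hpop; simp at hpop
        | some v =>
          rw [hg] at hpop
          simp only [Option.map_some, Option.some.injEq, Prod.mk.injEq] at hpop
          exact ⟨by rw [hpop.1], hpop.2.symm⟩
      have hstart : start ≤ n :=
        hbnd (seg, start) (PySem.Dict.mem_items_of_get?_eq_some bAct hget.1)
      have hbnd2 : ∀ p ∈ act'.items, p.2 ≤ n := by
        intro p hp
        rw [hget.2] at hp
        exact hbnd p (pvMem_erase_items hp)
      simp only [pvEndPartA, pvEndPartM, hact, hres, hpop]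
      unfold pvInv
      refine ⟨?_, ?_, ?_, ?_, rfl⟩
      · exact happ act' hbnd2
      · intro p hp
        exact le_trans (hbnd2 p hp) (by omega)
      · rw [hemp act']
      · rw [PySem.List.pyRange_one_succ_right hstart]

theorem pvStep_sim (n : Int) (e : List (String × String)) (a : pvStateA) (b : pvStateM)
    (h : pvInv n a b) : pvInv (n + 1) (pvStepA n e a) (pvStepM n e b) := by
  obtain ⟨hact, hbnd, hkeep, hvalid, hblocks⟩ := h
  simp only [pvStepA, pvStepM, hkeep, hvalid, hblocks]
  apply pvEndPart_sim
  · rcases hS : (if PySem.Dict.get? (PySem.Dict.mk e) "type" = some "keyframe"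
        then PySem.Dict.get? (PySem.Dict.mk e) "marker"
        else none).bind (fun m => PySem.Dict.get? pvStartMarkers m) with _ | seg
    · simpa using hact
    · simp only
      rw [hact]
      have hnil : ([] : List Int) = PySem.List.pyRange n n 1 :=
        (PySem.List.pyRange_one_eq_nil le_rfl).symm
      rw [hnil, pvMapVal_insert]
  · rcases hS : (if PySem.Dict.get? (PySem.Dict.mk e) "type" = some "keyframe"
        then PySem.Dict.get? (PySem.Dict.mk e) "marker"
        else none).bind (fun m => PySem.Dict.get? pvStartMarkers m) with _ | seg
    · simpa using hbnd
    · simp only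
      intro p hp
      rcases pvMem_insert_items hp with h | h
      · simp [h]
      · exact hbnd p h

theorem pvLoop_sim (es : List (List (String × String))) (n : Int) (a : pvStateA) (b : pvStateM)
    (h : pvInv n a b) : pvInv (n + es.length) (pvLoopA n es a) (pvLoopM n es b) := by
  induction es generalizing n a b with
  | nil => simpa using h
  | cons e es ih =>
    simp only [pvLoopA, pvLoopM, List.length_cons]
    have := ih (n + 1) _ _ (pvStep_sim n e a b h)
    have harith : n + 1 + (es.length : Int) = n + ((es.length : Int) + 1) := by omega
    rwa [harith] at this

-- ---- stage 2: M simulates B ----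

theorem pvGetD_set_true (l : List Bool) (idx i : Nat) (h : idx < l.length) :
    (l.set idx true).getD i false = if i = idx then true else l.getD i false := by
  induction l generalizing idx i with
  | nil => simp at h
  | cons x xs ih =>
    cases idx with
    | zero => cases i <;> simp [List.getD]
    | succ k =>
      cases i with
      | zero => simp [List.getD]
      | succ j =>
        simp only [List.set, List.getD_cons_succ]
        rw [ih k j (by simpa using h)]
        simp

-- the simulation invariant between M's and B's loop states after processing indices < idx
def pvInvMB (idx : Nat) (m : pvStateM) (b : pvStateB) : Prop :=
  m.1 = b.2.2 ∧
  m.2.2.2 = (b.2.1.length : Int) ∧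
  (∀ i : Nat, ((i : Int) ∈ m.2.1 ↔ b.1.getD i false = true)) ∧
  (∀ j : Int, j ∈ m.2.2.1 ↔ ∃ p ∈ b.2.1, p.1 ≤ j ∧ j ≤ p.2) ∧
  (∀ p ∈ b.2.1, 0 ≤ p.1 ∧ p.1 ≤ p.2 ∧ p.2 < (idx : Int)) ∧
  (∀ p ∈ b.2.2.items, 0 ≤ p.2 ∧ p.2 < (idx : Int))

-- proof-only "core" forms of the two step functions, parametrised by the decoded marker data
def pvCoreM (idxI : Int) (sS eE : Option String) (ak : Bool) (st : pvStateM) : pvStateM :=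
  let active1 := match sS with
    | some seg => st.1.insert seg idxI
    | none => st.1
  pvEndPartM idxI eE sS.isSome ak active1 st.2.1 st.2.2.1 st.2.2.2

def pvCoreB (idx : Nat) (sS eE : Option String) (ak : Bool) (st : pvStateB) : pvStateB :=
  let active1 := match sS with
    | some seg => st.2.2.insert seg (idx : Int)
    | none => st.2.2
  let endRes : List (Int × Int) × PySem.Dict String Int × Bool :=
    match eE with
    | some seg =>
      match PySem.Dict.pop? active1 seg with
      | some (start, act') => (st.2.1 ++ [(start, (idx : Int))], act', false)
      | none => (st.2.1, active1, true)
    | none => (st.2.1, active1, false)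
  let keep1 :=
    if ak || (endRes.2.1.items.isEmpty && !sS.isSome && !endRes.2.2)
    then st.1.set idx true else st.1
  (keep1, endRes.1, endRes.2.1)

theorem pvStepM_eq_core (idxI : Int) (e : List (String × String)) (st : pvStateM) :
    pvStepM idxI e st =
      pvCoreM idxI ((pvMarkerOf e).bind (fun m => PySem.Dict.get? pvStartMarkers m))
        ((pvMarkerOf e).bind (fun m => PySem.Dict.get? pvEndMarkers m))
        (match pvMarkerOf e with
          | some m => PySem.Set.contains pvKeepKeyframes m
          | none => false) st := rfl

theorem pvStepB_eq_core (idx : Nat) (mk : Option String) (st : pvStateB) :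
    pvStepB idx mk st =
      pvCoreB idx (mk.bind (fun m => PySem.Dict.get? pvStartMarkers m))
        (mk.bind (fun m => PySem.Dict.get? pvEndMarkers m))
        (match mk with
          | some m => PySem.Set.contains pvKeepKeyframes m
          | none => false) st := rfl

theorem pvPop_eq (d : PySem.Dict String Int) (k : String) (start : Int)
    (act' : PySem.Dict String Int) (hpop : d.pop? k = some (start, act')) :
    d.get? k = some start ∧ act' = d.erase k := by
  simp only [PySem.Dict.pop?] at hpop
  cases hg : d.get? k with
  | none => rw [hg] at hpop; simp at hpop
  | some v =>
    rw [hg] at hpop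
    simp only [Option.map_some, Option.some.injEq, Prod.mk.injEq] at hpop
    exact ⟨by rw [hpop.1], hpop.2.symm⟩

theorem pvKeep_simMB (idx : Nat) (ak c : Bool) (keepM : List Int) (keepB : List Bool)
    (hlen : idx < keepB.length)
    (hK : ∀ i : Nat, ((i : Int) ∈ keepM ↔ keepB.getD i false = true)) :
    ∀ i : Nat, ((i : Int) ∈ (if ak then PySem.Set.add keepM (idx : Int)
        else if c then PySem.Set.add keepM (idx : Int) else keepM) ↔
      (if ak || c then keepB.set idx true else keepB).getD i false = true) := by
  intro i
  have hset : ((keepB.set idx true).getD i false = true) ↔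
      (keepB.getD i false = true ∨ i = idx) := by
    rw [pvGetD_set_true keepB idx i hlen]
    by_cases hi : i = idx <;> simp [hi]
  have hadd : ((i : Int) ∈ PySem.Set.add keepM (idx : Int)) ↔
      ((i : Int) ∈ keepM ∨ i = idx) := by
    rw [PySem.Set.mem_add, Int.natCast_inj]
  cases ak with
  | true =>
    rw [if_pos rfl, Bool.true_or, if_pos rfl, hadd, hset, hK i]
  | false =>
    rw [if_neg (by simp), Bool.false_or]
    cases c with
    | true => rw [if_pos rfl, if_pos rfl, hadd, hset, hK i]
    | false => rw [if_neg (by simp), if_neg (by simp)]; exact hK i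

theorem pvValid_simMB (idx : Nat) (start : Int) (validM : List Int)
    (blocksB : List (Int × Int))
    (hV : ∀ j : Int, j ∈ validM ↔ ∃ p ∈ blocksB, p.1 ≤ j ∧ j ≤ p.2) :
    ∀ j : Int, (j ∈ (PySem.List.pyRange start ((idx : Int) + 1) 1).foldl PySem.Set.add validM ↔
      ∃ p ∈ blocksB ++ [(start, (idx : Int))], p.1 ≤ j ∧ j ≤ p.2) := by
  intro j
  have hupd : (PySem.List.pyRange start ((idx : Int) + 1) 1).foldl PySem.Set.add validM
      = PySem.Set.update validM (PySem.List.pyRange start ((idx : Int) + 1) 1) := rfl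
  rw [hupd, PySem.Set.mem_update, PySem.List.mem_pyRange_one, hV]
  constructor
  · rintro (⟨p, hp, h⟩ | h)
    · exact ⟨p, by simp [hp], h⟩
    · exact ⟨(start, (idx : Int)), by simp, by constructor <;> omega⟩
  · rintro ⟨p, hp, h⟩
    rcases List.mem_append.1 hp with hp' | hp'
    · exact Or.inl ⟨p, hp', h⟩
    · right
      simp only [List.mem_singleton] at hp'
      subst hp'
      simp only at h
      omega

-- the end-of-iteration part of the M/B simulation, with the updated active dict abstract
theorem pvCoreEnd_simMB (idx : Nat) (eE : Option String) (iss ak : Bool)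
    (d1 : PySem.Dict String Int) (keepM validM : List Int) (cnt : Int)
    (keepB : List Bool) (blocksB : List (Int × Int))
    (hlen : idx < keepB.length)
    (hd1 : ∀ p ∈ d1.items, 0 ≤ p.2 ∧ p.2 ≤ (idx : Int))
    (hC : cnt = (blocksB.length : Int))
    (hK : ∀ i : Nat, ((i : Int) ∈ keepM ↔ keepB.getD i false = true))
    (hV : ∀ j : Int, j ∈ validM ↔ ∃ p ∈ blocksB, p.1 ≤ j ∧ j ≤ p.2)
    (hB : ∀ p ∈ blocksB, 0 ≤ p.1 ∧ p.1 ≤ p.2 ∧ p.2 < (idx : Int)) :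
    pvInvMB (idx + 1) (pvEndPartM (idx : Int) eE iss ak d1 keepM validM cnt)
      (let endRes : List (Int × Int) × PySem.Dict String Int × Bool :=
        match eE with
        | some seg =>
          match PySem.Dict.pop? d1 seg with
          | some (start, act') => (blocksB ++ [(start, (idx : Int))], act', false)
          | none => (blocksB, d1, true)
        | none => (blocksB, d1, false);
       (if ak || (endRes.2.1.items.isEmpty && !iss && !endRes.2.2)
        then keepB.set idx true else keepB, endRes.1, endRes.2.1)) ∧
      (if ak || ((match eE with
        | some seg =>
          match PySem.Dict.pop? d1 seg with
          | some (start, act') => ((blocksB ++ [(start, (idx : Int))] : List (Int × Int)), act', false)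
          | none => (blocksB, d1, true)
        | none => (blocksB, d1, false) : List (Int × Int) × PySem.Dict String Int × Bool).2.1.items.isEmpty && !iss && !(match eE with
        | some seg =>
          match PySem.Dict.pop? d1 seg with
          | some (start, act') => ((blocksB ++ [(start, (idx : Int))] : List (Int × Int)), act', false)
          | none => (blocksB, d1, true)
        | none => (blocksB, d1, false) : List (Int × Int) × PySem.Dict String Int × Bool).2.2)
        then keepB.set idx true else keepB).length = keepB.length := by
  have hsetlen : ∀ (cnd : Bool), (if cnd then keepB.set idx true else keepB).length = keepB.length := by
    intro cnd
    cases cnd <;> simp [List.length_set]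
  unfold pvEndPartM pvInvMB
  cases eE with
  | none =>
    refine ⟨⟨rfl, hC, ?_, hV, ?_, ?_⟩, hsetlen _⟩
    · exact pvKeep_simMB idx ak (d1.items.isEmpty && !iss && !false) keepM keepB hlen hK
    · intro p hp
      have := hB p hp
      push_cast
      omega
    · intro p hp
      have := hd1 p hp
      push_cast
      omega
  | some seg =>
    cases hpop : d1.pop? seg with
    | none =>
      simp only [hpop]
      refine ⟨⟨trivial, hC, ?_, hV, ?_, ?_⟩, hsetlen _⟩
      · exact pvKeep_simMB idx ak (d1.items.isEmpty && !iss && !true) keepM keepB hlen hK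
      · intro p hp
        have := hB p hp
        push_cast
        omega
      · intro p hp
        have := hd1 p hp
        push_cast
        omega
    | some pr =>
      obtain ⟨start, act'⟩ := pr
      obtain ⟨hget, herase⟩ := pvPop_eq d1 seg start act' hpop
      have hstart : 0 ≤ start ∧ start ≤ (idx : Int) :=
        hd1 (seg, start) (PySem.Dict.mem_items_of_get?_eq_some d1 hget)
      simp only [hpop]
      refine ⟨⟨trivial, ?_, ?_, ?_, ?_, ?_⟩, hsetlen _⟩
      · simp [hC]
      · exact pvKeep_simMB idx ak (act'.items.isEmpty && !iss && !false) keepM keepB hlen hK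
      · exact pvValid_simMB idx start validM blocksB hV
      · intro p hp
        rcases List.mem_append.1 hp with hp' | hp'
        · have := hB p hp'
          push_cast
          omega
        · simp only [List.mem_singleton] at hp'
          subst hp'
          refine ⟨hstart.1, hstart.2, by push_cast; omega⟩
      · intro p hp
        rw [herase] at hp
        have := hd1 p (pvMem_erase_items hp)
        push_cast
        omega

theorem pvCore_simMB (idx : Nat) (sS eE : Option String) (ak : Bool)
    (m : pvStateM) (b : pvStateB) (hlen : idx < b.1.length) (h : pvInvMB idx m b) :
    pvInvMB (idx + 1) (pvCoreM (idx : Int) sS eE ak m) (pvCoreB idx sS eE ak b) ∧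
      (pvCoreB idx sS eE ak b).1.length = b.1.length := by
  obtain ⟨hA, hC, hK, hV, hB, hAb⟩ := h
  have hd1 : ∀ p ∈ (sS.elim b.2.2 (fun seg => b.2.2.insert seg (idx : Int))).items,
      0 ≤ p.2 ∧ p.2 ≤ (idx : Int) := by
    cases sS with
    | none =>
      intro p hp
      have := hAb p hp
      omega
    | some seg =>
      intro p hp
      rcases pvMem_insert_items hp with rfl | hmem
      · exact ⟨Int.natCast_nonneg idx, le_refl _⟩
      · have := hAb p hmem
        omega
  have hmain := pvCoreEnd_simMB idx eE sS.isSome ak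
    (sS.elim b.2.2 (fun seg => b.2.2.insert seg (idx : Int)))
    m.2.1 m.2.2.1 m.2.2.2 b.1 b.2.1 hlen hd1 hC hK hV hB
  cases sS with
  | none => simpa only [pvCoreM, pvCoreB, hA, Option.elim, Option.isSome] using hmain
  | some seg => simpa only [pvCoreM, pvCoreB, hA, Option.elim, Option.isSome] using hmain

theorem pvStep_simMB (idx : Nat) (e : List (String × String)) (m : pvStateM) (b : pvStateB)
    (hlen : idx < b.1.length) (h : pvInvMB idx m b) :
    pvInvMB (idx + 1) (pvStepM (idx : Int) e m) (pvStepB idx (pvMarkerOf e) b) ∧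
      (pvStepB idx (pvMarkerOf e) b).1.length = b.1.length := by
  rw [pvStepM_eq_core, pvStepB_eq_core]
  exact pvCore_simMB idx _ _ _ m b hlen h

theorem pvLoop_simMB (es : List (List (String × String))) (idx : Nat) (m : pvStateM) (b : pvStateB)
    (hlen : idx + es.length ≤ b.1.length) (h : pvInvMB idx m b) :
    pvInvMB (idx + es.length) (pvLoopM (idx : Int) es m) (pvLoopB idx (es.map pvMarkerOf) b) ∧
      (pvLoopB idx (es.map pvMarkerOf) b).1.length = b.1.length := by
  induction es generalizing idx m b with
  | nil => exact ⟨h, rfl⟩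
  | cons e es ih =>
    have hlen' : idx + (es.length + 1) ≤ b.1.length := by simpa using hlen
    simp only [List.map_cons, pvLoopM, pvLoopB, List.length_cons]
    obtain ⟨h1, h2⟩ := pvStep_simMB idx e m b (by omega) h
    have hcast : ((idx : Int) + 1) = ((idx + 1 : Nat) : Int) := by push_cast; ring
    rw [hcast]
    obtain ⟨g1, g2⟩ := ih (idx + 1) _ _ (by omega) h1
    constructor
    · have harith : idx + 1 + es.length = idx + (es.length + 1) := by omega
      rwa [harith] at g1
    · omega

-- ---- stage 3: the patch pass realises M's final keep set ----

theorem pvRangeSet_length (l : List Int) (keep : List Bool) :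
    (l.foldl (fun k i => k.set i.toNat true) keep).length = keep.length := by
  induction l generalizing keep with
  | nil => rfl
  | cons x xs ih => simp [List.foldl, ih, List.length_set]

theorem pvRangeSet_getD (n : Nat) : ∀ (a b : Int) (keep : List Bool) (i : Nat),
    (b - a).toNat = n → 0 ≤ a → b ≤ (keep.length : Int) →
    (((PySem.List.pyRange a b 1).foldl (fun k i => k.set i.toNat true) keep).getD i false = true ↔
      (keep.getD i false = true ∨ (a ≤ (i : Int) ∧ (i : Int) < b))) := by
  induction n with
  | zero =>
    intro a b keep i hfuel ha hb
    have hba : b ≤ a := by omega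
    rw [PySem.List.pyRange_one_eq_nil hba]
    simp only [List.foldl]
    constructor
    · exact Or.inl
    · rintro (h | h)
      · exact h
      · omega
  | succ k ih =>
    intro a b keep i hfuel ha hb
    have hab : a < b := by omega
    rw [PySem.List.pyRange_one_cons hab]
    simp only [List.foldl]
    have hlt : a.toNat < keep.length := by omega
    rw [ih (a + 1) b (keep.set a.toNat true) i (by omega) (by omega)
      (by rw [List.length_set]; omega)]
    rw [pvGetD_set_true keep a.toNat i hlt]
    by_cases hi : i = a.toNat
    · simp only [hi]
      constructor
      · intro _; right; omega
      · intro _; left; rfl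
    · rw [if_neg hi]
      have : ¬ ((i : Int) = a) := by omega
      constructor
      · rintro (h | h)
        · exact Or.inl h
        · right; omega
      · rintro (h | h)
        · exact Or.inl h
        · right; omega

theorem pvPatch_length (bs : List (Int × Int)) (keep : List Bool) :
    (bs.foldl pvPatchBlock keep).length = keep.length := by
  induction bs generalizing keep with
  | nil => rfl
  | cons p ps ih =>
    simp only [List.foldl]
    rw [ih, pvPatchBlock, pvRangeSet_length]

theorem pvPatch_getD (bs : List (Int × Int)) (keep : List Bool) (i : Nat)
    (hb : ∀ p ∈ bs, 0 ≤ p.1 ∧ p.2 < (keep.length : Int)) :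
    ((bs.foldl pvPatchBlock keep).getD i false = true ↔
      (keep.getD i false = true ∨ ∃ p ∈ bs, p.1 ≤ (i : Int) ∧ (i : Int) ≤ p.2)) := by
  induction bs generalizing keep with
  | nil => simp
  | cons p ps ih =>
    simp only [List.foldl]
    have hp := hb p (by simp)
    have hlen : (pvPatchBlock keep p).length = keep.length := pvRangeSet_length _ _
    rw [ih (pvPatchBlock keep p) (by intro q hq; rw [hlen]; exact hb q (by simp [hq]))]
    rw [pvPatchBlock, pvRangeSet_getD ((p.2 + 1 - p.1).toNat) p.1 (p.2 + 1) keep i rfl hp.1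
      (by omega)]
    constructor
    · rintro ((h | h) | ⟨q, hq, h⟩)
      · exact Or.inl h
      · exact Or.inr ⟨p, by simp, by omega⟩
      · exact Or.inr ⟨q, by simp [hq], h⟩
    · rintro (h | ⟨q, hq, h⟩)
      · exact Or.inl (Or.inl h)
      · rcases List.mem_cons.1 hq with rfl | hq'
        · exact Or.inl (Or.inr (by omega))
        · exact Or.inr ⟨q, hq', h⟩

-- ---- stage 4: the two filters agree pointwise ----

theorem pvFilter_eq_zip : ∀ (es : List (List (String × String))) (idx : Nat)
    (keepL : List Int) (kb : List Bool), kb.length = es.length →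
    (∀ i : Nat, (((idx : Int) + (i : Int)) ∈ keepL ↔ kb.getD i false = true)) →
    pvFilterA (idx : Int) es keepL =
      (es.zip kb).filterMap (fun p => if p.2 then some p.1 else none) := by
  intro es
  induction es with
  | nil => intro idx keepL kb _ _; simp [pvFilterA]
  | cons e es ih =>
    intro idx keepL kb hlen hiff
    cases kb with
    | nil => simp at hlen
    | cons k0 kb' =>
      have h0 := hiff 0
      simp only [List.getD_cons_zero, Nat.cast_zero, add_zero] at h0
      have hhead : keepL.contains ((idx : Nat) : Int) = k0 := by
        cases k0 with
        | true => simpa [List.contains_iff_mem] using h0.2 rfl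
        | false =>
          by_cases hm : ((idx : Int)) ∈ keepL
          · exact absurd (h0.1 hm) (by simp)
          · simpa [List.contains_iff_mem] using hm
      have htail : ∀ i : Nat, ((((idx + 1 : Nat) : Int) + (i : Int)) ∈ keepL ↔
          kb'.getD i false = true) := by
        intro i
        have h := hiff (i + 1)
        have hc : ((idx : Int) + ((i + 1 : Nat) : Int)) = (((idx + 1 : Nat) : Int) + (i : Int)) := by
          push_cast
          ring
        rw [hc] at h
        simpa using h
      have hrec := ih (idx + 1) keepL kb' (by simpa using hlen) htail
      have hcast : ((idx : Int) + 1) = ((idx + 1 : Nat) : Int) := by push_cast; ring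
      cases k0 with
      | true =>
        simp only [pvFilterA, hhead, if_pos rfl, List.zip_cons_cons, List.filterMap_cons]
        rw [hcast, hrec]
        simp
      | false =>
        simp only [pvFilterA, hhead, List.zip_cons_cons, List.filterMap_cons]
        rw [if_neg (by simp), hcast, hrec]
        simp

-- getD of the all-false initial keep array
theorem pvGetD_replicate_false (n i : Nat) : (List.replicate n false).getD i false = false := by
  induction n generalizing i with
  | zero => simp [List.getD]
  | succ k ih => cases i <;> simp [List.getD, List.replicate, ih]

-- assembling the two final results from the loop invariants
theorem pvFinal (entries : List (List (String × String)))
    (stM : pvStateM) (stB : pvStateB)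
    (hC : stM.2.2.2 = (stB.2.1.length : Int))
    (hK : ∀ i : Nat, ((i : Int) ∈ stM.2.1 ↔ stB.1.getD i false = true))
    (hV : ∀ j : Int, j ∈ stM.2.2.1 ↔ ∃ p ∈ stB.2.1, p.1 ≤ j ∧ j ≤ p.2)
    (hB : ∀ p ∈ stB.2.1, 0 ≤ p.1 ∧ p.1 ≤ p.2 ∧ p.2 < (entries.length : Int))
    (hLen : stB.1.length = entries.length) :
    (pvFilterA 0 entries (stM.2.2.1.foldl PySem.Set.add stM.2.1), stM.2.2.2) =
      ((entries.zip (stB.2.1.foldl pvPatchBlock stB.1)).filterMap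
        (fun p => if p.2 then some p.1 else none), (stB.2.1.length : Int)) := by
  refine Prod.ext ?_ hC
  show pvFilterA ((0 : Nat) : Int) entries _ = _
  apply pvFilter_eq_zip
  · rw [pvPatch_length, hLen]
  · intro i
    have hupd : stM.2.2.1.foldl PySem.Set.add stM.2.1
        = PySem.Set.update stM.2.1 stM.2.2.1 := rfl
    rw [show (((0 : Nat) : Int) + (i : Int)) = (i : Int) from by push_cast; ring,
      hupd, PySem.Set.mem_update, hK i, hV (i : Int),
      pvPatch_getD stB.2.1 stB.1 i (by
        intro p hp
        refine ⟨(hB p hp).1, ?_⟩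
        rw [hLen]
        exact (hB p hp).2.2)]

-- ===== VERDICT (by name: the statement is the Claim_ definition above) =====
theorem prune_unmatched_blocks_spec : Claim_equal_prune_unmatched_blocks := by
  intro entries _
  unfold Spec_prune_unmatched_blocks prune_unmatched_blocks prune_unmatched_blocks_alt
  dsimp only
  -- stage 1: A ↔ M
  have h0 : pvInv 0 (PySem.Dict.mk [], [], [], 0) (PySem.Dict.mk [], [], [], 0) := by
    refine ⟨rfl, ?_, rfl, rfl, rfl⟩
    intro p hp
    simp at hp
  obtain ⟨-, -, hkeep, hvalid, hblocks⟩ := pvLoop_sim entries 0 _ _ h0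
  -- stage 2: M ↔ B
  have h0MB : pvInvMB 0 (PySem.Dict.mk [], [], [], 0)
      (List.replicate entries.length false, [], PySem.Dict.mk []) := by
    refine ⟨rfl, rfl, ?_, ?_, ?_, ?_⟩
    · intro i; simp [pvGetD_replicate_false]
    · intro j; simp
    · intro p hp; simp at hp
    · intro p hp; simp [PySem.Dict.mk] at hp
  obtain ⟨⟨hA, hC, hK, hV, hB, hAb⟩, hLen⟩ :=
    pvLoop_simMB entries 0 (PySem.Dict.mk [], [], [], 0)
      (List.replicate entries.length false, [], PySem.Dict.mk [])
      (by simp) h0MB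
  have hB' : ∀ p ∈ (pvLoopB 0 (entries.map pvMarkerOf)
      (List.replicate entries.length false, [], PySem.Dict.mk [])).2.1,
      0 ≤ p.1 ∧ p.1 ≤ p.2 ∧ p.2 < (entries.length : Int) := by
    intro p hp
    have := hB p hp
    simpa using this
  have hLen' : (pvLoopB 0 (entries.map pvMarkerOf)
      (List.replicate entries.length false, [], PySem.Dict.mk [])).1.length
      = entries.length := by
    simpa using hLen
  rw [hkeep, hvalid, hblocks]
  exact pvFinal entries _ _ hC hK hV hB' hLen'
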